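-- pv_equiv track=rewrite | github.com/stackhpc/ansible-slurm-appliance | ansible/roles/linux-ansible-init/files/ansible-init.py | assemble_list
-- ===== SOURCE A (Python) =====
-- def assemble_list(data, prefix):
--     """
--     Assembles a list of items based on keys in data with the format "<prefix>_<idx>_<key>".
--     """
--     list_items = {}
--     for key, value in data.items():
--         if not key.startswith(prefix):
--             continue
--         idx, item_key = key.removeprefix(prefix).split("_", maxsplit = 1)
--         list_items.setdefault(idx, {})[item_key] = value
--     return [list_items[k] for k in sorted(list_items.keys())]
-- ===== SOURCE B (Python) =====
-- def assemble_list(data, prefix):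
--     """
--     Assembles a list of items based on keys in data with the format "<prefix>_<idx>_<key>".
--     """
--     triples = []
--     for key, value in data.items():
--         if key.startswith(prefix):
--             idx, item_key = key.removeprefix(prefix).split("_", maxsplit=1)
--             triples.append((idx, item_key, value))
--     triples.sort(key=lambda t: t[0])  # stable, lexicographic on the raw idx string
--     result = []
--     i = 0
--     n = len(triples)
--     while i < n:
--         idx = triples[i][0]
--         group = {}
--         while i < n and triples[i][0] == idx:
--             group[triples[i][1]] = triples[i][2]
--             i += 1
--         result.append(group)
--     return result
-- ===== Notes on version B (the rewrite author's own statement) =====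
-- stated objective: alternative
-- what changed: A groups into a dict-of-dicts keyed by idx and then sorts the group keys; B builds a flat (idx, item_key, value) triple list, stably sorts it by the raw idx string, and forms the group dicts in one linear grouped pass over the sorted triples.
import Mathlib
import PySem

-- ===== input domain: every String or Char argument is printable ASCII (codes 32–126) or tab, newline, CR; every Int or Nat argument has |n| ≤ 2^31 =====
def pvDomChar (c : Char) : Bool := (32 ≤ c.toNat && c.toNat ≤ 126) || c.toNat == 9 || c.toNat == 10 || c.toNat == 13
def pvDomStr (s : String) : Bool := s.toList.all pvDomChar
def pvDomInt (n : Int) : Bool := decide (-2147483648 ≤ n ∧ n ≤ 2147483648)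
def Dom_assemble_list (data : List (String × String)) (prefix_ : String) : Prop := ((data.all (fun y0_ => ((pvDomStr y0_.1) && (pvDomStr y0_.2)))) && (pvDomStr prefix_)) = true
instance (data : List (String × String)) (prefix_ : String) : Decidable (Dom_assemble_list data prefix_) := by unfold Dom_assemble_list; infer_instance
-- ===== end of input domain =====

-- B replaces A's hash-grouping into a dict-of-dicts followed by sorting the group keys with a flat
-- triple list that is stably sorted by idx and grouped in one linear pass (objective: alternative).

-- `idx, item_key = <parts>`: Python's 2-tuple unpacking of a split result
-- (none exactly where the unpacking raises ValueError)
def pyUnpack2 (parts : Option (List String)) : Option (String × String) :=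
  match parts with
  | some [a, b] => some (a, b)
  | _ => none

-- s.removeprefix(p)  (exact: drop len(p) code points when s starts with p, else unchanged)
def pyRemoveprefix (s p : String) : String :=
  if PySem.Str.startswith s p then String.mk (s.toList.drop p.toList.length) else s

-- ===== PORT A =====
def assemble_list (data : List (String × String)) (prefix_ : String) : List (List (String × String)) :=
  let list_items : PySem.Dict String (PySem.Dict String String) :=
    data.foldl (fun list_items kv =>
      if PySem.Str.startswith kv.1 prefix_ then
        match pyUnpack2 (PySem.Str.splitMax? (pyRemoveprefix kv.1 prefix_) "_" 1) with
        | some ik =>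
            -- list_items.setdefault(idx, {})[item_key] = value
            list_items.modify ik.1 PySem.Dict.empty (fun d => d.insert ik.2 kv.2)
        | none => list_items  -- ValueError in Python: excluded by Pre_
      else list_items) PySem.Dict.empty
  (PySem.List.sorted list_items.keys (fun k => k)).map
    (fun k => ((list_items.get? k).getD PySem.Dict.empty).items)  -- k ∈ keys, so get? is never none

-- ===== PORT B =====
-- the inner while loop of Source B: consume triples while their idx equals `idx`, filling `group`
def pvBuildGroup (idx : String) (group : PySem.Dict String String) :
    List (String × String × String) → PySem.Dict String String × List (String × String × String)
  | [] => (group, [])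
  | t :: rest =>
    if t.1 = idx then pvBuildGroup idx (group.insert t.2.1 t.2.2) rest
    else (group, t :: rest)

theorem pvBuildGroup_snd_length (idx : String) (g : PySem.Dict String String)
    (l : List (String × String × String)) : (pvBuildGroup idx g l).2.length ≤ l.length := by
  induction l generalizing g with
  | nil => simp [pvBuildGroup]
  | cons t rest ih =>
    simp only [pvBuildGroup]
    split
    · exact le_trans (ih _) (Nat.le_succ _)
    · simp

-- the outer while loop of Source B
def pvGroupRun : List (String × String × String) → List (List (String × String))
  | [] => []
  | t :: rest =>
    (pvBuildGroup t.1 (PySem.Dict.empty.insert t.2.1 t.2.2) rest).1.items ::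
      pvGroupRun (pvBuildGroup t.1 (PySem.Dict.empty.insert t.2.1 t.2.2) rest).2
  termination_by l => l.length
  decreasing_by
    exact Nat.lt_succ_of_le (pvBuildGroup_snd_length _ _ _)

def assemble_list_alt (data : List (String × String)) (prefix_ : String) : List (List (String × String)) :=
  let triples : List (String × String × String) :=
    data.foldl (fun acc kv =>
      if PySem.Str.startswith kv.1 prefix_ then
        match pyUnpack2 (PySem.Str.splitMax? (pyRemoveprefix kv.1 prefix_) "_" 1) with
        | some (idx, item_key) => acc ++ [(idx, item_key, kv.2)]
        | none => acc  -- ValueError in Python: excluded by Pre_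
      else acc) []
  pvGroupRun (PySem.List.sorted triples (fun t => t.1))

-- ===== PRECONDITION & SPEC =====
-- Pre_ excludes exactly the inputs where A raises ValueError: a key that starts with the prefix
-- but whose remainder after removing the prefix contains no '_' (split yields one piece, unpacking fails).
def Pre_assemble_list (data : List (String × String)) (prefix_ : String) : Prop :=
  ∀ kv ∈ data, PySem.Str.startswith kv.1 prefix_ = true →
    '_' ∈ kv.1.toList.drop prefix_.toList.length
instance (data : List (String × String)) (prefix_ : String) : Decidable (Pre_assemble_list data prefix_) := by
  unfold Pre_assemble_list; infer_instance

def pvWitness_assemble_list : (List (String × String)) × String :=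
  ([("p1_a", "x"), ("p0_b", "y"), ("p1_c", "z"), ("q", "w")], "p")

def Spec_assemble_list (data : List (String × String)) (prefix_ : String) (out : List (List (String × String))) : Prop := out = assemble_list_alt data prefix_
instance (data : List (String × String)) (prefix_ : String) (out : List (List (String × String))) : Decidable (Spec_assemble_list data prefix_ out) := by unfold Spec_assemble_list; infer_instance

-- ===== CLAIM (what is proved, stated in full; the proofs are below) =====
def Claim_equal_assemble_list : Prop := ∀ (data : List (String × String)) (prefix_ : String), Dom_assemble_list data prefix_ → Pre_assemble_list data prefix_ → Spec_assemble_list data prefix_ (assemble_list data prefix_)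

-- ===== LEMMAS AND PROOFS =====

-- the parse both loops perform on one (key, value) pair
def pvParse (prefix_ : String) (kv : String × String) : Option (String × String × String) :=
  if PySem.Str.startswith kv.1 prefix_ then
    (pyUnpack2 (PySem.Str.splitMax? (pyRemoveprefix kv.1 prefix_) "_" 1)).map
      (fun ik => (ik.1, ik.2, kv.2))
  else none

-- one inner-dict insertion, and the group dict a given idx ends up with
def pvIns (d : PySem.Dict String String) (t : String × String × String) : PySem.Dict String String :=
  d.insert t.2.1 t.2.2

def pvG (i : String) (ts : List (String × String × String)) : PySem.Dict String String :=
  (ts.filter (fun t => t.1 == i)).foldl pvIns PySem.Dict.empty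

-- the distinct idxs of a triple list, in order of first appearance
def pvIdxList : List (String × String × String) → List String
  | [] => []
  | t :: rest => t.1 :: pvIdxList (rest.dropWhile (fun r => r.1 == t.1))
  termination_by l => l.length
  decreasing_by
    exact Nat.lt_succ_of_le (List.length_dropWhile_le _ _)

theorem pv_A_fold (prefix_ : String) (data : List (String × String))
    (acc : PySem.Dict String (PySem.Dict String String)) :
    data.foldl (fun list_items kv =>
      if PySem.Str.startswith kv.1 prefix_ then
        match pyUnpack2 (PySem.Str.splitMax? (pyRemoveprefix kv.1 prefix_) "_" 1) with
        | some ik =>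
            list_items.modify ik.1 PySem.Dict.empty (fun d => d.insert ik.2 kv.2)
        | none => list_items
      else list_items) acc
    = (data.filterMap (pvParse prefix_)).foldl
        (fun acc t => acc.modify t.1 PySem.Dict.empty (fun d => pvIns d t)) acc := by
  induction data generalizing acc with
  | nil => rfl
  | cons kv data ih =>
    by_cases h : PySem.Str.startswith kv.1 prefix_
    · rcases hm : pyUnpack2 (PySem.Str.splitMax? (pyRemoveprefix kv.1 prefix_) "_" 1) with _ | ⟨a, b⟩
      · have hp : pvParse prefix_ kv = none := by simp only [pvParse, h, hm, ite_true, Option.map_none]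
        simp only [List.foldl_cons, List.filterMap_cons, hp, h, hm, ite_true]
        exact ih _
      · have hp : pvParse prefix_ kv = some (a, b, kv.2) := by
          simp only [pvParse, h, hm, ite_true, Option.map_some]
        simp only [List.foldl_cons, List.filterMap_cons, hp, h, hm, ite_true]
        exact ih _
    · have hp : pvParse prefix_ kv = none := by simp only [pvParse, h, Bool.false_eq_true, ite_false]
      simp only [List.foldl_cons, List.filterMap_cons, hp, h, Bool.false_eq_true, ite_false]
      exact ih _

theorem pv_B_fold (prefix_ : String) (data : List (String × String))
    (acc : List (String × String × String)) :
    data.foldl (fun acc kv =>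
      if PySem.Str.startswith kv.1 prefix_ then
        match pyUnpack2 (PySem.Str.splitMax? (pyRemoveprefix kv.1 prefix_) "_" 1) with
        | some (idx, item_key) => acc ++ [(idx, item_key, kv.2)]
        | none => acc
      else acc) acc
    = acc ++ data.filterMap (pvParse prefix_) := by
  induction data generalizing acc with
  | nil => simp
  | cons kv data ih =>
    by_cases h : PySem.Str.startswith kv.1 prefix_
    · rcases hm : pyUnpack2 (PySem.Str.splitMax? (pyRemoveprefix kv.1 prefix_) "_" 1) with _ | ⟨a, b⟩
      · have hp : pvParse prefix_ kv = none := by simp only [pvParse, h, hm, ite_true, Option.map_none]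
        simp only [List.foldl_cons, List.filterMap_cons, hp, h, hm, ite_true]
        exact ih _
      · have hp : pvParse prefix_ kv = some (a, b, kv.2) := by
          simp only [pvParse, h, hm, ite_true, Option.map_some]
        simp only [List.foldl_cons, List.filterMap_cons, hp, h, hm, ite_true]
        rw [ih]
        simp
    · have hp : pvParse prefix_ kv = none := by simp only [pvParse, h, Bool.false_eq_true, ite_false]
      simp only [List.foldl_cons, List.filterMap_cons, hp, h, Bool.false_eq_true, ite_false]
      exact ih _

theorem pv_getD_fold (ts : List (String × String × String))
    (d : PySem.Dict String (PySem.Dict String String)) (i : String) :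
    (ts.foldl (fun acc t => acc.modify t.1 PySem.Dict.empty (fun d => pvIns d t)) d).getD i PySem.Dict.empty
    = (ts.filter (fun t => t.1 == i)).foldl pvIns (d.getD i PySem.Dict.empty) := by
  induction ts generalizing d with
  | nil => rfl
  | cons t ts ih =>
    simp only [List.foldl_cons, List.filter_cons]
    by_cases h : t.1 = i
    · subst h
      simp only [beq_self_eq_true, ite_true, List.foldl_cons]
      rw [ih, PySem.Dict.getD_modify_self]
    · have hne : (t.1 == i) = false := beq_eq_false_iff_ne.mpr h
      simp only [hne, Bool.false_eq_true, ite_false]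
      rw [ih, PySem.Dict.getD_modify_of_ne _ _ _ (fun hh => h hh.symm)]

theorem pv_keys_fold (ts : List (String × String × String)) :
    (ts.foldl (fun acc t => acc.modify t.1 PySem.Dict.empty (fun d => pvIns d t)) PySem.Dict.empty).keys
    = PySem.List.dedup (ts.map (fun t => t.1)) := by
  have h := PySem.Dict.keys_foldl_modify_key (ν := PySem.Dict String String) ts (fun t => t.1)
    PySem.Dict.empty (fun d t => fun v => pvIns v t) PySem.Dict.empty
  simpa [PySem.List.dedup_eq_ofList] using h

theorem pv_filter_insertBy (i : String) (x : String × String × String)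
    (ys : List (String × String × String)) (hys : ys.Pairwise (fun a b => a.1 ≤ b.1)) :
    (PySem.List.insertBy (fun a b => decide (a.1 < b.1)) x ys).filter (fun t => t.1 == i)
    = ys.filter (fun t => t.1 == i) ++ (if x.1 == i then [x] else []) := by
  induction ys with
  | nil => simp [PySem.List.insertBy, List.filter]; split <;> simp_all
  | cons y ys ih =>
    simp only [PySem.List.insertBy]
    by_cases hlt : x.1 < y.1
    · simp only [hlt, decide_true, ite_true]
      -- all elements of y :: ys have fst ≥ y.1 > x.1
      have hall : ∀ z ∈ y :: ys, ¬ (z.1 == i) = true ∨ ¬ (x.1 == i) = true := by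
        intro z hz
        by_cases hxi : (x.1 == i) = true
        · left
          have hyz : y.1 ≤ z.1 := by
            rcases List.mem_cons.mp hz with rfl | hz
            · exact le_refl _
            · exact (List.pairwise_cons.mp hys).1 z hz
          have : x.1 < z.1 := lt_of_lt_of_le hlt hyz
          simp only [beq_iff_eq]
          intro hzi
          exact absurd (hzi ▸ (beq_iff_eq.mp hxi) ▸ this) (lt_irrefl _)
        · right; exact hxi
      by_cases hxi : (x.1 == i) = true
      · have hnone : (y :: ys).filter (fun t => t.1 == i) = [] := by
          rw [List.filter_eq_nil_iff]
          intro z hz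
          rcases hall z hz with hh | hh
          · exact fun hc => hh hc
          · exact absurd hxi hh
        rw [List.filter_cons, hnone]
        simp [hxi]
      · simp only [Bool.not_eq_true] at hxi
        simp [List.filter_cons, hxi]
    · simp only [hlt, decide_false, Bool.false_eq_true, ite_false]
      rw [List.filter_cons, List.filter_cons, ih (List.pairwise_cons.mp hys).2]
      split <;> simp

theorem pv_filter_sorted (ts : List (String × String × String)) (i : String) :
    (PySem.List.sorted ts (fun t => t.1)).filter (fun t => t.1 == i)
    = ts.filter (fun t => t.1 == i) := by
  induction ts using List.reverseRecOn with
  | nil => rfl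
  | append_singleton ts x ih =>
    have hs : PySem.List.sorted (ts ++ [x]) (fun t => t.1)
        = PySem.List.insertBy (fun a b => decide (a.1 < b.1)) x (PySem.List.sorted ts (fun t => t.1)) := by
      rw [PySem.List.sorted_eq_foldl_insertBy, List.foldl_append, ← PySem.List.sorted_eq_foldl_insertBy]
      rfl
    rw [hs, pv_filter_insertBy i x _ (PySem.List.sorted_pairwise ts (fun t => t.1)), ih,
      List.filter_append]
    by_cases h : x.1 = i <;> simp [h]

theorem pv_buildGroup_eq (idx : String) (g : PySem.Dict String String)
    (l : List (String × String × String)) :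
    pvBuildGroup idx g l
    = ((l.takeWhile (fun r => r.1 == idx)).foldl pvIns g, l.dropWhile (fun r => r.1 == idx)) := by
  induction l generalizing g with
  | nil => simp [pvBuildGroup]
  | cons t rest ih =>
    by_cases h : t.1 = idx
    · simp [pvBuildGroup, h, ih, pvIns]
    · simp [pvBuildGroup, h]

theorem pv_dw_gt (rest : List (String × String × String)) (c : String)
    (hp : rest.Pairwise (fun a b => a.1 ≤ b.1)) (hb : ∀ z ∈ rest, c ≤ z.1) :
    ∀ z ∈ rest.dropWhile (fun r => r.1 == c), c < z.1 := by
  induction rest with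
  | nil => simp
  | cons r rest ih =>
    rw [List.dropWhile_cons]
    by_cases h : r.1 = c
    · simp only [h, beq_self_eq_true, ite_true]
      exact ih (List.pairwise_cons.mp hp).2 (fun z hz => hb z (by simp [hz]))
    · have hne : (r.1 == c) = false := beq_eq_false_iff_ne.mpr h
      simp only [hne, Bool.false_eq_true, ite_false]
      intro z hz
      rcases List.mem_cons.mp hz with rfl | hz
      · exact lt_of_le_of_ne (hb z (by simp)) (fun e => h e.symm)
      · have hcr : c < r.1 := lt_of_le_of_ne (hb r (by simp)) (fun e => h e.symm)
        exact lt_of_lt_of_le hcr ((List.pairwise_cons.mp hp).1 z hz)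

theorem pv_mem_idxList (s : List (String × String × String)) (i : String) :
    i ∈ pvIdxList s ↔ i ∈ s.map (fun t => t.1) := by
  induction s using pvIdxList.induct with
  | case1 => simp [pvIdxList]
  | case2 t rest ih =>
    rw [pvIdxList]
    simp only [List.mem_cons, List.map_cons, List.mem_cons, ih]
    constructor
    · rintro (rfl | h)
      · left; rfl
      · right
        have : i ∈ (rest.dropWhile (fun r => r.1 == t.1)).map (fun t => t.1) := h
        rcases List.mem_map.mp this with ⟨z, hz, rfl⟩
        exact List.mem_map.mpr ⟨z, (List.dropWhile_sublist _).mem hz, rfl⟩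
    · rintro (rfl | h)
      · left; rfl
      · rcases List.mem_map.mp h with ⟨z, hz, rfl⟩
        rw [← List.takeWhile_append_dropWhile (p := fun r => r.1 == t.1) (l := rest)] at hz
        rcases List.mem_append.mp hz with hz | hz
        · left
          have h2 := List.mem_takeWhile_imp (p := fun r : String × String × String => r.1 == t.1) hz
          simpa using h2
        · right
          exact List.mem_map.mpr ⟨z, hz, rfl⟩

theorem pv_idxList_pairwise_lt (s : List (String × String × String))
    (hs : s.Pairwise (fun a b => a.1 ≤ b.1)) :
    (pvIdxList s).Pairwise (fun a b => a < b) := by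
  induction s using pvIdxList.induct with
  | case1 => simp [pvIdxList]
  | case2 t rest ih =>
    rw [pvIdxList]
    have hpc := List.pairwise_cons.mp hs
    have hdw : ∀ z ∈ rest.dropWhile (fun r => r.1 == t.1), t.1 < z.1 :=
      pv_dw_gt rest t.1 hpc.2 hpc.1
    refine List.pairwise_cons.mpr ⟨?_, ih (hpc.2.sublist (List.dropWhile_sublist _))⟩
    intro j hj
    rcases List.mem_map.mp ((pv_mem_idxList _ j).mp hj) with ⟨z, hz, rfl⟩
    exact hdw z hz

theorem pv_groupRun_eq (s : List (String × String × String))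
    (hs : s.Pairwise (fun a b => a.1 ≤ b.1)) :
    pvGroupRun s = (pvIdxList s).map (fun i => (pvG i s).items) := by
  induction s using pvIdxList.induct with
  | case1 => simp [pvGroupRun, pvIdxList]
  | case2 t rest ih =>
    have hpc := List.pairwise_cons.mp hs
    have hdw : ∀ z ∈ rest.dropWhile (fun r => r.1 == t.1), t.1 < z.1 :=
      pv_dw_gt rest t.1 hpc.2 hpc.1
    -- filter of the whole list at idx t.1 is t :: takeWhile
    have hfilt_t : (t :: rest).filter (fun r => r.1 == t.1)
        = t :: rest.takeWhile (fun r => r.1 == t.1) := by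
      rw [List.filter_cons]
      simp only [beq_self_eq_true, ite_true]
      congr 1
      conv_lhs => rw [← List.takeWhile_append_dropWhile (p := fun r => r.1 == t.1) (l := rest)]
      rw [List.filter_append]
      have h1 : (rest.takeWhile (fun r => r.1 == t.1)).filter (fun r => r.1 == t.1)
          = rest.takeWhile (fun r => r.1 == t.1) := by
        rw [List.filter_eq_self]
        intro z hz
        exact List.mem_takeWhile_imp (p := fun r : String × String × String => r.1 == t.1) hz
      have h2 : (rest.dropWhile (fun r => r.1 == t.1)).filter (fun r => r.1 == t.1) = [] := by
        rw [List.filter_eq_nil_iff]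
        intro z hz
        simpa using ne_of_gt (hdw z hz)
      rw [h1, h2, List.append_nil]
    -- filter of the whole list at idx i > t.1 is the filter of the dropWhile part
    have hfilt_i : ∀ i, t.1 < i → (t :: rest).filter (fun r => r.1 == i)
        = (rest.dropWhile (fun r => r.1 == t.1)).filter (fun r => r.1 == i) := by
      intro i hi
      rw [List.filter_cons]
      have hne : (t.1 == i) = false := beq_eq_false_iff_ne.mpr (ne_of_lt hi)
      simp only [hne, Bool.false_eq_true, ite_false]
      conv_lhs => rw [← List.takeWhile_append_dropWhile (p := fun r => r.1 == t.1) (l := rest)]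
      rw [List.filter_append]
      have h1 : (rest.takeWhile (fun r => r.1 == t.1)).filter (fun r => r.1 == i) = [] := by
        rw [List.filter_eq_nil_iff]
        intro z hz
        have hz1 := List.mem_takeWhile_imp (p := fun r : String × String × String => r.1 == t.1) hz
        simp only [beq_iff_eq] at hz1 ⊢
        rw [hz1]
        exact ne_of_lt hi
      rw [h1, List.nil_append]
    rw [pvGroupRun, pvIdxList, pv_buildGroup_eq, List.map_cons]
    congr 1
    · -- the first group
      have : pvG t.1 (t :: rest)
          = (rest.takeWhile (fun r => r.1 == t.1)).foldl pvIns (PySem.Dict.empty.insert t.2.1 t.2.2) := by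
        rw [pvG, hfilt_t, List.foldl_cons]
        rfl
      rw [this]
    · rw [ih (hpc.2.sublist (List.dropWhile_sublist _))]
      apply List.map_congr_left
      intro i hi
      rcases List.mem_map.mp ((pv_mem_idxList _ i).mp hi) with ⟨z, hz, rfl⟩
      rw [pvG, pvG, hfilt_i z.1 (hdw z hz)]

theorem pv_G_sorted (ts : List (String × String × String)) (i : String) :
    pvG i (PySem.List.sorted ts (fun t => t.1)) = pvG i ts := by
  rw [pvG, pvG, pv_filter_sorted]

theorem pv_main (data : List (String × String)) (prefix_ : String) :
    assemble_list data prefix_ = assemble_list_alt data prefix_ := by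
  rw [assemble_list, assemble_list_alt]
  rw [pv_A_fold, pv_B_fold, List.nil_append]
  set ts := data.filterMap (pvParse prefix_) with hts
  set s := PySem.List.sorted ts (fun t => t.1) with hsdef
  have hsp : s.Pairwise (fun a b => a.1 ≤ b.1) := PySem.List.sorted_pairwise ts (fun t => t.1)
  -- B side
  rw [pv_groupRun_eq s hsp]
  have hB : (pvIdxList s).map (fun i => (pvG i s).items)
      = (pvIdxList s).map (fun i => (pvG i ts).items) := by
    apply List.map_congr_left
    intro i _
    rw [pv_G_sorted]
  rw [hB]
  -- A side
  rw [pv_keys_fold]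
  have hA : ∀ k, ((List.foldl (fun acc t => acc.modify t.1 PySem.Dict.empty fun d => pvIns d t)
        PySem.Dict.empty ts).get? k).getD PySem.Dict.empty = pvG k ts := by
    intro k
    rw [← PySem.Dict.getD_eq_get?_getD, pv_getD_fold, PySem.Dict.getD_empty, pvG]
  -- the sorted distinct keys on A's side are exactly B's idx list
  have hidx : PySem.List.sorted (PySem.List.dedup (ts.map (fun t => t.1))) (fun k => k) = pvIdxList s := by
    apply PySem.List.sorted_eq_of_perm_of_pairwise_lt
    · apply (List.perm_ext_iff_of_nodup ?_ ?_).mpr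
      · intro a
        rw [pv_mem_idxList, PySem.List.mem_dedup]
        have hperm : (s.map (fun t => t.1)).Perm (ts.map (fun t => t.1)) :=
          (PySem.List.sorted_perm ts (fun t => t.1) false).map _
        exact hperm.mem_iff
      · exact ((pv_idxList_pairwise_lt s hsp).imp ne_of_lt)
      · exact PySem.List.nodup_dedup _
    · exact pv_idxList_pairwise_lt s hsp
  rw [hidx]
  apply List.map_congr_left
  intro i _
  rw [hA]

-- ===== VERDICT (by name: the statement is the Claim_ definition above) =====
theorem assemble_list_spec : Claim_equal_assemble_list := by
  intro data prefix_ _ _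
  unfold Spec_assemble_list
  exact pv_main data prefix_
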